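-- pv_equiv track=rewrite | github.com/pypi-data/pypi-mirror-382 | packages/tiny-3d-engine/tiny_3d_engine-1.0.0.tar.gz/tiny_3d_engine-1.0.0/src/tiny_3d_engine/part3d.py | conn_flatten_to_edges
-- ===== SOURCE A (Python) =====
-- from typing import Tuple, List
--
-- def conn_flatten_to_edges(conn: List[Tuple[float]]) -> List[Tuple[float]]:
--     new_conn = []
--     for element in conn:
--         if len(element) <= 2:
--             new_conn.append(element)
--         elif len(element) == 3:
--             new_conn.append([element[0], element[1]])
--             new_conn.append([element[1], element[2]])
--             new_conn.append([element[2], element[0]])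
--         elif len(element) == 4:
--             new_conn.append([element[0], element[1]])
--             new_conn.append([element[1], element[2]])
--             new_conn.append([element[2], element[3]])
--             new_conn.append([element[3], element[0]])
--         else:
--             raise RuntimeError(f"Element {element} of size unexpected")
--     return new_conn
-- ===== SOURCE B (Python) =====
-- from typing import Tuple, List
--
--
-- def _cycle(first, elem):
--     # recursively pair consecutive vertices; the last vertex closes back to `first`
--     if len(elem) == 1:
--         return [[elem[0], first]]
--     return [[elem[0], elem[1]]] + _cycle(first, elem[1:])
--
--
-- def conn_flatten_to_edges(conn: List[Tuple[float]]) -> List[Tuple[float]]: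
--     # recursive decomposition: head element's edges, then recurse on the tail
--     if not conn:
--         return []
--     element = conn[0]
--     rest = conn_flatten_to_edges(conn[1:])
--     if len(element) <= 2:
--         return [element] + rest
--     if len(element) <= 4:
--         return _cycle(element[0], element) + rest
--     raise RuntimeError(f"Element {element} of size unexpected")
-- ===== Notes on version B (the rewrite author's own statement) =====
-- stated objective: alternative
-- what changed: Replaces A's iterative accumulator loop with unrolled size-3/size-4 emission blocks by a doubly recursive formulation: recursion over the connectivity list, and a recursive pairwise helper that walks each polygon consuming one vertex at a time and closes the cycle back to the remembered first vertex, with no indexing at all.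
import Mathlib
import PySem

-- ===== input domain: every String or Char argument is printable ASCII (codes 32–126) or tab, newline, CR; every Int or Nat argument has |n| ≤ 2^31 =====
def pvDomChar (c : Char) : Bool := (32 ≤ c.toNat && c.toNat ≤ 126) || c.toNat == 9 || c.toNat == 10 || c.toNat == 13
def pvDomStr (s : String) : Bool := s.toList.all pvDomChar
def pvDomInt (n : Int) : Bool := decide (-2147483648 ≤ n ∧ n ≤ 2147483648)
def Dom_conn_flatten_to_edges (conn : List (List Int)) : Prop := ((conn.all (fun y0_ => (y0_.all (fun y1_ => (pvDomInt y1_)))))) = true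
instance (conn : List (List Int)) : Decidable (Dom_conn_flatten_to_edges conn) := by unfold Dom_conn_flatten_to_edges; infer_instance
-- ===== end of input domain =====

-- One-line summary: B replaces A's iterative accumulator loop with unrolled per-size
-- emission by a doubly recursive formulation (recursion over the list, and a recursive
-- pairwise walk of each polygon closing back to its first vertex); alternative, not faster.

-- ===== PORT A =====
-- A's loop: accumulator new_conn, per-element branches in A's order; indices are in range
-- when the branch fires, so List.getD is exact there. The `raise` branch (len ≥ 5) is
-- excluded by Pre_ (the port leaves new_conn unchanged there; under ¬Pre_ nothing is claimed).
def conn_flatten_to_edges (conn : List (List Int)) : List (List Int) :=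
  conn.foldl (fun new_conn element =>
    if element.length ≤ 2 then
      new_conn ++ [element]
    else if element.length = 3 then
      new_conn ++ [[element.getD 0 0, element.getD 1 0],
                   [element.getD 1 0, element.getD 2 0],
                   [element.getD 2 0, element.getD 0 0]]
    else if element.length = 4 then
      new_conn ++ [[element.getD 0 0, element.getD 1 0],
                   [element.getD 1 0, element.getD 2 0],
                   [element.getD 2 0, element.getD 3 0],
                   [element.getD 3 0, element.getD 0 0]]
    else new_conn) []

-- ===== PORT B =====
-- B's helper _cycle: recursive pairwise walk; the last vertex closes back to `first`.
def pvCycle (first : Int) (elem : List Int) : List (List Int) :=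
  match elem with
  | [] => []
  | [a] => [[a, first]]
  | a :: b :: tl => [a, b] :: pvCycle first (b :: tl)

-- B's recursion over conn: head's edges, then recurse on the tail.
-- The raise branch (len ≥ 5) returns [] here; it is outside Pre_.
def conn_flatten_to_edges_alt (conn : List (List Int)) : List (List Int) :=
  match conn with
  | [] => []
  | element :: rest =>
    if element.length ≤ 2 then [element] ++ conn_flatten_to_edges_alt rest
    else if element.length ≤ 4 then
      pvCycle (element.getD 0 0) element ++ conn_flatten_to_edges_alt rest
    else []

-- ===== PRECONDITION & SPEC =====
-- Pre_ excludes exactly the inputs where A raises RuntimeError: an element of length ≥ 5.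
def Pre_conn_flatten_to_edges (conn : List (List Int)) : Prop :=
  ∀ e ∈ conn, e.length ≤ 4
instance (conn : List (List Int)) : Decidable (Pre_conn_flatten_to_edges conn) := by
  unfold Pre_conn_flatten_to_edges; infer_instance

def pvWitness_conn_flatten_to_edges : List (List Int) := [[1], [1, 2], [1, 2, 3], [1, 2, 3, 4]]

def Spec_conn_flatten_to_edges (conn : List (List Int)) (out : List (List Int)) : Prop := out = conn_flatten_to_edges_alt conn
instance (conn : List (List Int)) (out : List (List Int)) : Decidable (Spec_conn_flatten_to_edges conn out) := by unfold Spec_conn_flatten_to_edges; infer_instance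

-- ===== CLAIM =====
def Claim_equal_conn_flatten_to_edges : Prop := ∀ (conn : List (List Int)), Dom_conn_flatten_to_edges conn → Pre_conn_flatten_to_edges conn → Spec_conn_flatten_to_edges conn (conn_flatten_to_edges conn)

-- ===== LEMMAS AND PROOFS =====

-- A's per-element emission equals B's head contribution when the element has length ≤ 4.
theorem step_eq_cycle (e : List Int) (h : e.length ≤ 4) :
    (if e.length ≤ 2 then [e]
     else if e.length = 3 then
       [[e.getD 0 0, e.getD 1 0], [e.getD 1 0, e.getD 2 0], [e.getD 2 0, e.getD 0 0]]
     else if e.length = 4 then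
       [[e.getD 0 0, e.getD 1 0], [e.getD 1 0, e.getD 2 0],
        [e.getD 2 0, e.getD 3 0], [e.getD 3 0, e.getD 0 0]]
     else []) =
    (if e.length ≤ 2 then [e]
     else if e.length ≤ 4 then pvCycle (e.getD 0 0) e
     else []) := by
  match e with
  | [] => simp
  | [a] => simp
  | [a, b] => simp
  | [a, b, c] => simp [pvCycle]
  | [a, b, c, d] => simp [pvCycle]
  | a :: b :: c :: d :: x :: rest => simp at h; omega

-- The foldl accumulates exactly acc ++ B's recursive result under Pre_.
theorem foldl_eq_alt (conn : List (List Int)) (acc : List (List Int))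
    (h : ∀ e ∈ conn, e.length ≤ 4) :
    conn.foldl (fun new_conn element =>
      if element.length ≤ 2 then
        new_conn ++ [element]
      else if element.length = 3 then
        new_conn ++ [[element.getD 0 0, element.getD 1 0],
                     [element.getD 1 0, element.getD 2 0],
                     [element.getD 2 0, element.getD 0 0]]
      else if element.length = 4 then
        new_conn ++ [[element.getD 0 0, element.getD 1 0],
                     [element.getD 1 0, element.getD 2 0],
                     [element.getD 2 0, element.getD 3 0],
                     [element.getD 3 0, element.getD 0 0]]
      else new_conn) acc = acc ++ conn_flatten_to_edges_alt conn := by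
  induction conn generalizing acc with
  | nil => simp [conn_flatten_to_edges_alt]
  | cons e tl ih =>
    have he : e.length ≤ 4 := h e (List.mem_cons_self ..)
    have hstep := step_eq_cycle e he
    have htl : ∀ x ∈ tl, x.length ≤ 4 := fun x hx => h x (List.mem_cons_of_mem _ hx)
    simp only [List.foldl_cons, conn_flatten_to_edges_alt, ih _ htl]
    split_ifs at hstep ⊢ <;> simp_all

-- ===== VERDICT =====
theorem conn_flatten_to_edges_spec : Claim_equal_conn_flatten_to_edges := by
  intro conn _ hpre
  unfold Spec_conn_flatten_to_edges conn_flatten_to_edges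
  simpa using foldl_eq_alt conn [] hpre
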